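-- pv_equiv track=rewrite | github.com/duy12i1i7/hawkbot | src/hawkbot/hawkbot/HBSDK.py | decrypt_controller_data
-- ===== SOURCE A (Python) =====
-- def decrypt_controller_data(raw_data, dec_num=29):
--     dec_data = ''
--     findStart = False
--     for d in raw_data:
--         if d + dec_num == ord('#'):
--             findStart = True
--             continue
--         if findStart:
--             dec_data += chr(d + dec_num)
--     return dec_data
-- ===== SOURCE B (Python) =====
-- def decrypt_controller_data(raw_data, dec_num=29):
--     marker = ord('#') - dec_num
--     try:
--         i = raw_data.index(marker)
--     except ValueError:
--         return ''
--     return ''.join(chr(d + dec_num) for d in raw_data[i + 1:] if d != marker)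
-- ===== Notes on version B (the rewrite author's own statement) =====
-- stated objective: simpler
-- what changed: Replaces A's single stateful loop carrying a findStart flag and per-byte string concatenation by a two-phase 'find first marker index with list.index, then ''.join the decoded filtered tail' decomposition (join avoids repeated string building).
-- outside the precondition, e.g. on decrypt_controller_data([6, -40], 29): A raises ValueError, B raises ValueError
import Mathlib
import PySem

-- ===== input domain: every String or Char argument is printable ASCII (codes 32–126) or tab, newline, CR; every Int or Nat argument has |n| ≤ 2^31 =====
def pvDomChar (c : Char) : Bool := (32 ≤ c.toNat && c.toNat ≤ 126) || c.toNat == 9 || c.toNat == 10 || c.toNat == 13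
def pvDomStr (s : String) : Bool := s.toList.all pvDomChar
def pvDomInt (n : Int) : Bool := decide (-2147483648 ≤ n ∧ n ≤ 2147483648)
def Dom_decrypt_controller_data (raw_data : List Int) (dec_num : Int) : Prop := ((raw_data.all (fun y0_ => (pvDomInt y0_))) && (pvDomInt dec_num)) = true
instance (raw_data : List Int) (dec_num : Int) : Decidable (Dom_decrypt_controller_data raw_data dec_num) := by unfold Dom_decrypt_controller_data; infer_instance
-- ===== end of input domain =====

-- B replaces A's single stateful loop (findStart flag + string concatenation) by a
-- two-phase decomposition: find the first marker index, then decode the filtered tail.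


-- chr(d + dec_num): exact for 0 ≤ d+dec_num ≤ 0x10FFFF excluding surrogates (Pre_ admits only those)
def pvDecByte (dec_num d : Int) : Char := Char.ofNat (d + dec_num).toNat

-- ===== PORT A =====
-- loop body: 'if d + dec_num == ord('#'): findStart = True; continue / if findStart: dec_data += chr(d+dec_num)'
def pvAStep (dec_num : Int) (st : List Char × Bool) (d : Int) : List Char × Bool :=
  if d + dec_num = 35 then (st.1, true)
  else if st.2 = true then (st.1 ++ [pvDecByte dec_num d], st.2)
  else st

def decrypt_controller_data (raw_data : List Int) (dec_num : Int) : String :=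
  String.ofList (raw_data.foldl (pvAStep dec_num) ([], false)).1

-- ===== PORT B =====
def decrypt_controller_data_alt (raw_data : List Int) (dec_num : Int) : String :=
  match raw_data.idxOf? (35 - dec_num) with
  | none => ""
  | some i =>
      String.ofList (((raw_data.drop (i + 1)).filter (fun d => d != 35 - dec_num)).map (pvDecByte dec_num))

-- ===== PRECONDITION & SPEC =====
-- Pre_ excludes exactly the inputs where Python's chr raises (code point negative, > 0x10FFFF)
-- and the surrogate range 0xD800–0xDFFF, where chr returns a lone-surrogate str that has no
-- Lean String counterpart; only bytes strictly after the first marker (and not equal to it)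
-- are ever decoded, so only those are constrained.
def Pre_decrypt_controller_data (raw_data : List Int) (dec_num : Int) : Prop :=
  ∀ d ∈ raw_data.drop ((raw_data.idxOf? (35 - dec_num)).getD raw_data.length + 1),
    d = 35 - dec_num ∨ (0 ≤ d + dec_num ∧ d + dec_num < 55296) ∨ (57343 < d + dec_num ∧ d + dec_num ≤ 1114111)
instance (raw_data : List Int) (dec_num : Int) : Decidable (Pre_decrypt_controller_data raw_data dec_num) := by unfold Pre_decrypt_controller_data; infer_instance

def pvWitness_decrypt_controller_data : List Int × Int := ([7, 6, 70, 6, 80, 90], 29)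

def Spec_decrypt_controller_data (raw_data : List Int) (dec_num : Int) (out : String) : Prop := out = decrypt_controller_data_alt raw_data dec_num
instance (raw_data : List Int) (dec_num : Int) (out : String) : Decidable (Spec_decrypt_controller_data raw_data dec_num out) := by unfold Spec_decrypt_controller_data; infer_instance

-- ===== CLAIM (what is proved, stated in full; the proofs are below) =====
def Claim_equal_decrypt_controller_data : Prop := ∀ (raw_data : List Int) (dec_num : Int), Dom_decrypt_controller_data raw_data dec_num → Pre_decrypt_controller_data raw_data dec_num → Spec_decrypt_controller_data raw_data dec_num (decrypt_controller_data raw_data dec_num)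

-- ===== LEMMAS AND PROOFS =====
theorem pv_witness_ok :
    Dom_decrypt_controller_data pvWitness_decrypt_controller_data.1 pvWitness_decrypt_controller_data.2 ∧
    Pre_decrypt_controller_data pvWitness_decrypt_controller_data.1 pvWitness_decrypt_controller_data.2 := by
  decide

theorem pv_foldl_true (dec_num : Int) (l : List Int) (acc : List Char) :
    l.foldl (pvAStep dec_num) (acc, true)
      = (acc ++ (l.filter (fun d => d != 35 - dec_num)).map (pvDecByte dec_num), true) := by
  induction l generalizing acc with
  | nil => simp
  | cons d t ih =>
    by_cases h : d + dec_num = 35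
    · have hd : d = 35 - dec_num := by omega
      simp [pvAStep, hd, ih]
    · have hd : ¬ d = 35 - dec_num := by omega
      simp [pvAStep, h, hd, ih]

theorem pv_foldl_false (dec_num : Int) (l : List Int) :
    (l.foldl (pvAStep dec_num) ([], false)).1
      = (match l.idxOf? (35 - dec_num) with
         | none => []
         | some i => ((l.drop (i + 1)).filter (fun d => d != 35 - dec_num)).map (pvDecByte dec_num)) := by
  induction l with
  | nil => simp
  | cons d t ih =>
    by_cases h : d + dec_num = 35
    · have hd : d = 35 - dec_num := by omega
      simp [pvAStep, hd, List.idxOf?, List.findIdx?_cons, pv_foldl_true]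
    · have hd : ¬ d = 35 - dec_num := by omega
      have hstep : pvAStep dec_num ([], false) d = ([], false) := by
        simp [pvAStep, h]
      rw [List.foldl_cons, hstep, ih]
      simp only [List.idxOf?, List.findIdx?_cons, beq_iff_eq, hd]
      cases hfi : List.findIdx? (fun x => x == 35 - dec_num) t with
      | none => simp
      | some i => simp [List.drop_succ_cons]

-- ===== VERDICT (by name: the statement is the Claim_ definition above) =====
theorem decrypt_controller_data_spec : Claim_equal_decrypt_controller_data := by
  intro raw_data dec_num _ _
  unfold Spec_decrypt_controller_data decrypt_controller_data decrypt_controller_data_alt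
  rw [pv_foldl_false]
  cases h : raw_data.idxOf? (35 - dec_num) <;> simp
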